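-- pv_equiv track=rewrite | github.com/JungWooGeon/Programmers | 3-15-30.py | solution
-- ===== SOURCE A (Python) =====
-- from bisect import bisect_left, bisect_right
--
-- def count_by_range(a, left_value, right_value):
--     left_index = bisect_left(a, left_value)
--     right_index = bisect_right(a, right_value)
--     return right_index - left_index
--
-- def solution(words, queries):
--     answer = []
--     array = [[] for _ in range(10001)]
--     reversed_array = [[] for _ in range(10001)]
--     for word in words:
--         array[len(word)].append(word)
--         reversed_array[len(word)].append(word[::-1])
--
--     for i in range(10001):
--         array[i].sort()
--         reversed_array[i].sort()
--
--     for query in queries: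
--         result = []
--         if query[0] == '?':
--             result = count_by_range(reversed_array[len(query)], query[::-1].replace('?', 'a'), query[::-1].replace('?', 'z'))
--         else:
--             result = count_by_range(array[len(query)], query.replace('?', 'a'), query.replace('?', 'z'))
--         answer.append(result)
--     return answer
-- ===== SOURCE B (Python) =====
-- def solution(words, queries):
--     answer = []
--     for query in queries:
--         if query[0] == '?':
--             lo = query[::-1].replace('?', 'a')
--             hi = query[::-1].replace('?', 'z')
--             answer.append(sum(1 for w in words
--                               if len(w) == len(query) and lo <= w[::-1] <= hi))
--         else:
--             lo = query.replace('?', 'a')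
--             hi = query.replace('?', 'z')
--             answer.append(sum(1 for w in words
--                               if len(w) == len(query) and lo <= w <= hi))
--     return answer
-- ===== Notes on version B (the rewrite author's own statement) =====
-- stated objective: simpler
-- what changed: Replaces A's 10001 length buckets, per-bucket sorting and bisect range counting with a direct per-query linear scan that counts the words of matching length lying between the '?'->'a' and '?'->'z' substitutions.
import Mathlib
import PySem

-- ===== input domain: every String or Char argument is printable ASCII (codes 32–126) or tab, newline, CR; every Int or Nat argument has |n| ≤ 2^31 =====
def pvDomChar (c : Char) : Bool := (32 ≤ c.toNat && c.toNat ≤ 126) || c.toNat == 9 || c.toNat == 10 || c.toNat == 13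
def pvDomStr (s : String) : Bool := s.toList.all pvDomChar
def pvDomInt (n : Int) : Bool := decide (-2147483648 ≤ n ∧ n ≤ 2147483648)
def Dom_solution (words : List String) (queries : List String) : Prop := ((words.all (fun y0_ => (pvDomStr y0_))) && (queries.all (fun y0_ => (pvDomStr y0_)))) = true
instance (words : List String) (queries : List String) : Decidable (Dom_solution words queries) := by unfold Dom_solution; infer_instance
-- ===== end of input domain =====

-- B replaces A's 10001 length buckets + per-bucket sort + bisect counting by a direct
-- per-query linear count of the words of matching length between the '?'->'a' and '?'->'z'
-- substitutions (same values; simpler, not claimed faster).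


-- ===== PORT A =====
-- w[::-1] (both Pythons reverse strings this way; always `some`, .getD "" is never reached)
def pvRev (s : String) : String := (PySem.Str.slice? s none none (-1)).getD ""

-- count_by_range from A: bisect_right - bisect_left, as an Int
def count_by_range (a : List String) (left_value right_value : String) : Int :=
  (PySem.List.bisectRight a right_value : Int) - (PySem.List.bisectLeft a left_value : Int)

def solution (words : List String) (queries : List String) : List Int :=
  -- array = [[] for _ in range(10001)]; reversed_array likewise
  let array : List (List String) := (PySem.List.pyRange 0 10001 1).map (fun _ => ([] : List String))
  let reversed_array : List (List String) := (PySem.List.pyRange 0 10001 1).map (fun _ => ([] : List String))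
  -- for word in words: array[len(word)].append(word); reversed_array[len(word)].append(word[::-1])
  let p := words.foldl
    (fun (p : List (List String) × List (List String)) word =>
      (PySem.List.pySetD p.1 (PySem.Str.len word)
         (PySem.List.pyGetD p.1 (PySem.Str.len word) [] ++ [word]),
       PySem.List.pySetD p.2 (PySem.Str.len word)
         (PySem.List.pyGetD p.2 (PySem.Str.len word) [] ++ [pvRev word])))
    (array, reversed_array)
  -- for i in range(10001): array[i].sort(); reversed_array[i].sort()
  let p2 := (PySem.List.pyRange 0 10001 1).foldl
    (fun (a : List (List String) × List (List String)) i =>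
      (PySem.List.pySetD a.1 i (PySem.List.sorted (PySem.List.pyGetD a.1 i []) (fun x => x) false),
       PySem.List.pySetD a.2 i (PySem.List.sorted (PySem.List.pyGetD a.2 i []) (fun x => x) false)))
    p
  -- for query in queries: … answer.append(result)
  queries.foldl
    (fun answer query =>
      answer ++
        [if PySem.Str.pyGet? query 0 == some '?' then
           count_by_range (PySem.List.pyGetD p2.2 (PySem.Str.len query) [])
             (PySem.Str.replace (pvRev query) "?" "a")
             (PySem.Str.replace (pvRev query) "?" "z")
         else
           count_by_range (PySem.List.pyGetD p2.1 (PySem.Str.len query) [])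
             (PySem.Str.replace query "?" "a")
             (PySem.Str.replace query "?" "z")])
    []

-- ===== PORT B =====
def solution_alt (words : List String) (queries : List String) : List Int :=
  queries.foldl
    (fun answer query =>
      answer ++
        [if PySem.Str.pyGet? query 0 == some '?' then
           let lo := PySem.Str.replace (pvRev query) "?" "a"
           let hi := PySem.Str.replace (pvRev query) "?" "z"
           ((words.countP (fun w =>
               PySem.Str.len w == PySem.Str.len query &&
               decide (lo ≤ pvRev w) && decide (pvRev w ≤ hi)) : Nat) : Int)
         else
           let lo := PySem.Str.replace query "?" "a"
           let hi := PySem.Str.replace query "?" "z"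
           ((words.countP (fun w =>
               PySem.Str.len w == PySem.Str.len query &&
               decide (lo ≤ w) && decide (w ≤ hi)) : Nat) : Int)])
    []

-- ===== PRECONDITION & SPEC =====
-- A raises IndexError on an empty query (query[0]) and on any word or query longer than
-- 10000 (its bucket arrays have indices 0..10000); exactly those inputs are excluded.
def Pre_solution (words : List String) (queries : List String) : Prop :=
  (∀ w ∈ words, w.toList.length ≤ 10000) ∧
  (∀ q ∈ queries, q.toList.length ≠ 0 ∧ q.toList.length ≤ 10000)
instance (words : List String) (queries : List String) : Decidable (Pre_solution words queries) := by
  unfold Pre_solution; infer_instance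

def pvWitness_solution : List String × List String := (["frodo", "front", "frost", "?ost"], ["fro??", "?????", "??st"])

def Spec_solution (words : List String) (queries : List String) (out : List Int) : Prop := out = solution_alt words queries
instance (words : List String) (queries : List String) (out : List Int) : Decidable (Spec_solution words queries out) := by unfold Spec_solution; infer_instance

-- ===== CLAIM (what is proved, stated in full; the proofs are below) =====
def Claim_equal_solution : Prop := ∀ (words : List String) (queries : List String), Dom_solution words queries → Pre_solution words queries → Spec_solution words queries (solution words queries)

-- ===== LEMMAS AND PROOFS =====
theorem pv_replace_go (n : Char) (l acc : List Char) (fuel : Nat) (h : l.length ≤ fuel) :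
    PySem.Chars.replace.go ['?'] [n] fuel l acc =
      acc.reverse ++ l.map (fun d => if d = '?' then n else d) := by
  induction fuel generalizing l acc with
  | zero =>
    have : l = [] := by cases l <;> simp_all
    subst this; simp [PySem.Chars.replace.go]
  | succ fuel ih =>
    cases l with
    | nil => simp [PySem.Chars.replace.go]
    | cons c t =>
      rw [PySem.Chars.replace.go]
      by_cases hc : c = '?'
      · subst hc
        have hpre : List.isPrefixOf ['?'] ('?' :: t) = true := by simp [List.isPrefixOf]
        simp only [hpre, if_pos, List.length_cons, List.length_nil, List.drop_succ_cons, List.drop_zero]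
        rw [ih t _ (by simpa using h)]
        simp
      · have hpre : List.isPrefixOf ['?'] (c :: t) = false := by
          simp [List.isPrefixOf]; exact fun hh => hc hh.symm
        simp only [hpre]
        rw [if_neg (by simp)]
        rw [ih t _ (by simpa using h)]
        simp [hc]

theorem pv_replace_toList (s nstr : String) (nc : Char) (hn : nstr.toList = [nc]) :
    (PySem.Str.replace s "?" nstr).toList =
      s.toList.map (fun d => if d = '?' then nc else d) := by
  rw [PySem.Str.toList_replace]
  have hq : ("?" : String).toList = ['?'] := by decide
  rw [hq, hn, PySem.Chars.replace]
  rw [if_neg (by simp)]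
  exact pv_replace_go nc s.toList [] s.toList.length le_rfl

theorem pv_map_le_map (l : List Char) (f g : Char → Char) (h : ∀ c, f c ≤ g c) :
    l.map f ≤ l.map g := by
  induction l with
  | nil => simp
  | cons c t ih =>
    rcases lt_or_eq_of_le (h c) with hlt | heq
    · exact le_of_lt (by simp [List.cons_lt_cons_iff, hlt])
    · simp only [List.map_cons, heq]
      exact List.cons_le_cons _ ih

theorem pv_lo_le_hi (s : String) :
    PySem.Str.replace s "?" "a" ≤ PySem.Str.replace s "?" "z" := by
  rw [String.le_iff_toList_le]
  rw [pv_replace_toList s "a" 'a' (by decide), pv_replace_toList s "z" 'z' (by decide)]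
  apply pv_map_le_map
  intro c
  by_cases hc : c = '?' <;> simp [hc]

theorem pv_build_bucket (f : String → String) (words : List String)
    (A : List (List String)) (hA : A.length = 10001)
    (hw : ∀ w ∈ words, w.toList.length ≤ 10000) (L : Nat) (hL : L ≤ 10000) :
    PySem.List.pyGetD
      (words.foldl (fun a w =>
        PySem.List.pySetD a (PySem.Str.len w)
          (PySem.List.pyGetD a (PySem.Str.len w) [] ++ [f w])) A) (L : Int) [] =
    PySem.List.pyGetD A (L : Int) [] ++
      (words.filter (fun w => w.toList.length == L)).map f := by
  induction words generalizing A with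
  | nil => simp
  | cons w t ih =>
    have hwlen : w.toList.length ≤ 10000 := hw w (by simp)
    have hlen : PySem.Str.len w = ((w.toList.length : Nat) : Int) := PySem.Str.len_eq w
    simp only [List.foldl_cons, hlen]
    have hA' : (PySem.List.pySetD A ((w.toList.length : Nat) : Int)
        (PySem.List.pyGetD A ((w.toList.length : Nat) : Int) [] ++ [f w])).length = 10001 := by
      rw [PySem.List.length_pySetD]; exact hA
    rw [ih _ hA' (fun x hx => hw x (by simp [hx]))]
    rw [PySem.List.pyGetD_pySetD_natCast A (w.toList.length) L _ [] (by rw [hA]; omega)]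
    by_cases hEq : L = w.toList.length
    · simp [hEq, List.filter_cons]
    · have hEq' : ¬ (L = w.length) := by simpa using hEq
      have hne : ¬ (w.length = L) := fun hh => hEq' hh.symm
      simp [List.filter_cons, hne, hEq']

theorem pv_set_step {α : Type} (a : List α) (k : Nat) (hlt : k < a.length) (f : α → α) :
    (a.set k (f a[k])).take (k+1) ++ ((a.set k (f a[k])).drop (k+1)).map f =
      a.take k ++ (a.drop k).map f := by
  rw [List.drop_set_of_lt (by omega), List.take_add_one, List.take_set_of_le (le_refl _),
      List.getElem?_set_self (by omega), List.drop_eq_getElem_cons hlt]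
  simp only [Option.toList_some, List.map_cons, List.append_assoc, List.singleton_append]

theorem pv_sort_fold_aux (m : Nat) : ∀ (N k : Nat) (a : List (List String)), a.length = N →
    N - k ≤ m →
    (PySem.List.pyRange (k : Int) (N : Int) 1).foldl
      (fun a i => PySem.List.pySetD a i
        (PySem.List.sorted (PySem.List.pyGetD a i []) (fun x => x) false)) a =
    a.take k ++ (a.drop k).map (fun b => PySem.List.sorted b (fun x => x) false) := by
  induction m with
  | zero =>
    intro N k a ha hm
    have hk : N ≤ k := by omega
    rw [PySem.List.pyRange_one_eq_nil (by exact_mod_cast hk)]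
    rw [List.drop_eq_nil_of_le (by omega : a.length ≤ k), List.take_of_length_le (by omega : a.length ≤ k)]
    simp
  | succ m ih =>
    intro N k a ha hm
    by_cases hk : N ≤ k
    · rw [PySem.List.pyRange_one_eq_nil (by exact_mod_cast hk)]
      rw [List.drop_eq_nil_of_le (by omega : a.length ≤ k), List.take_of_length_le (by omega : a.length ≤ k)]
      simp
    · push_neg at hk
      rw [PySem.List.pyRange_one_cons (by exact_mod_cast hk)]
      simp only [List.foldl_cons]
      have hlt : k < a.length := by omega
      have hget : PySem.List.pyGetD a (k : Int) [] = a[k] := by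
        rw [PySem.List.pyGetD_natCast, List.getD_eq_getElem?_getD, List.getElem?_eq_getElem hlt]; rfl
      have hset : PySem.List.pySetD a (k : Int)
          (PySem.List.sorted (PySem.List.pyGetD a (k : Int) []) (fun x => x) false) =
          a.set k (PySem.List.sorted a[k] (fun x => x) false) := by
        rw [PySem.List.pySetD_natCast, hget]
      rw [hset]
      have hcast : ((k : Int) + 1) = ((k + 1 : Nat) : Int) := by push_cast; ring
      rw [hcast, ih N (k+1) _ (by simp [ha]) (by omega)]
      exact pv_set_step a k hlt (fun b => PySem.List.sorted b (fun x => x) false)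

theorem pv_sort_fold (k : Nat) (a : List (List String)) (ha : a.length = 10001) :
    (PySem.List.pyRange (k : Int) 10001 1).foldl
      (fun a i => PySem.List.pySetD a i
        (PySem.List.sorted (PySem.List.pyGetD a i []) (fun x => x) false)) a =
    a.take k ++ (a.drop k).map (fun b => PySem.List.sorted b (fun x => x) false) :=
  pv_sort_fold_aux 10001 10001 k a ha (by omega)

theorem pv_sorted_mono (xs : List String) (hs : List.Pairwise (· ≤ ·) xs)
    {i j : Nat} (hij : i ≤ j) (hj : j < xs.length) : xs[i] ≤ xs[j] := by
  rcases Nat.lt_or_ge i j with h | h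
  · exact (List.pairwise_iff_getElem.mp hs) i j (by omega) hj h
  · have : i = j := by omega
    subst this; exact le_refl _

theorem pv_bisectLeftLoop_spec (xs : List String) (x : String)
    (hs : List.Pairwise (· ≤ ·) xs) :
    ∀ (fuel lo hi : Nat), lo ≤ hi → hi ≤ xs.length → hi - lo ≤ fuel →
    (∀ j (hj : j < xs.length), j < lo → xs[j] < x) →
    (∀ j (hj : j < xs.length), hi ≤ j → ¬ xs[j] < x) →
    lo ≤ PySem.List.bisectLeftLoop xs x fuel lo hi ∧
    PySem.List.bisectLeftLoop xs x fuel lo hi ≤ hi ∧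
    (∀ j (hj : j < xs.length), j < PySem.List.bisectLeftLoop xs x fuel lo hi → xs[j] < x) ∧
    (∀ j (hj : j < xs.length), PySem.List.bisectLeftLoop xs x fuel lo hi ≤ j → ¬ xs[j] < x) := by
  intro fuel
  induction fuel with
  | zero =>
    intro lo hi hlohi hhi hfuel hpre hpost
    have : lo = hi := by omega
    subst this
    rw [PySem.List.bisectLeftLoop]
    exact ⟨le_refl _, le_refl _, hpre, hpost⟩
  | succ fuel ih =>
    intro lo hi hlohi hhi hfuel hpre hpost
    rw [PySem.List.bisectLeftLoop]
    by_cases hlt : lo < hi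
    · rw [if_pos hlt]
      have hmid : (lo + hi) / 2 < xs.length := by omega
      rw [List.getElem?_eq_getElem hmid]
      dsimp only
      by_cases hcmp : xs[(lo + hi) / 2] < x
      · rw [if_pos hcmp]
        have hres := ih ((lo + hi) / 2 + 1) hi (by omega) hhi (by omega)
          (fun j hj hjlt => lt_of_le_of_lt (pv_sorted_mono xs hs (by omega) hmid) hcmp) hpost
        exact ⟨le_trans (by omega) hres.1, hres.2.1, hres.2.2.1, hres.2.2.2⟩
      · rw [if_neg hcmp]
        have hres := ih lo ((lo + hi) / 2) (by omega) (by omega) (by omega) hpre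
          (fun j hj hje hjc => hcmp (lt_of_le_of_lt (pv_sorted_mono xs hs hje hj) hjc))
        exact ⟨hres.1, le_trans hres.2.1 (by omega), hres.2.2.1, hres.2.2.2⟩
    · rw [if_neg hlt]
      have : lo = hi := by omega
      subst this
      exact ⟨le_refl _, le_refl _, hpre, hpost⟩

theorem pv_bisectRightLoop_spec (xs : List String) (x : String)
    (hs : List.Pairwise (· ≤ ·) xs) :
    ∀ (fuel lo hi : Nat), lo ≤ hi → hi ≤ xs.length → hi - lo ≤ fuel →
    (∀ j (hj : j < xs.length), j < lo → xs[j] ≤ x) →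
    (∀ j (hj : j < xs.length), hi ≤ j → ¬ xs[j] ≤ x) →
    lo ≤ PySem.List.bisectRightLoop xs x fuel lo hi ∧
    PySem.List.bisectRightLoop xs x fuel lo hi ≤ hi ∧
    (∀ j (hj : j < xs.length), j < PySem.List.bisectRightLoop xs x fuel lo hi → xs[j] ≤ x) ∧
    (∀ j (hj : j < xs.length), PySem.List.bisectRightLoop xs x fuel lo hi ≤ j → ¬ xs[j] ≤ x) := by
  intro fuel
  induction fuel with
  | zero =>
    intro lo hi hlohi hhi hfuel hpre hpost
    have : lo = hi := by omega
    subst this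
    rw [PySem.List.bisectRightLoop]
    exact ⟨le_refl _, le_refl _, hpre, hpost⟩
  | succ fuel ih =>
    intro lo hi hlohi hhi hfuel hpre hpost
    rw [PySem.List.bisectRightLoop]
    by_cases hlt : lo < hi
    · rw [if_pos hlt]
      have hmid : (lo + hi) / 2 < xs.length := by omega
      rw [List.getElem?_eq_getElem hmid]
      dsimp only
      by_cases hcmp : x < xs[(lo + hi) / 2]
      · rw [if_pos hcmp]
        have hres := ih lo ((lo + hi) / 2) (by omega) (by omega) (by omega) hpre
          (fun j hj hje => not_le_of_gt (lt_of_lt_of_le hcmp (pv_sorted_mono xs hs hje hj)))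
        exact ⟨hres.1, le_trans hres.2.1 (by omega), hres.2.2.1, hres.2.2.2⟩
      · rw [if_neg hcmp]
        have hres := ih ((lo + hi) / 2 + 1) hi (by omega) hhi (by omega)
          (fun j hj hjlt => le_trans (pv_sorted_mono xs hs (by omega) hmid) (le_of_not_gt hcmp)) hpost
        exact ⟨le_trans (by omega) hres.1, hres.2.1, hres.2.2.1, hres.2.2.2⟩
    · rw [if_neg hlt]
      have : lo = hi := by omega
      subst this
      exact ⟨le_refl _, le_refl _, hpre, hpost⟩

theorem pv_countP_prefix {α : Type} (p : α → Bool) (xs : List α) (r : Nat) (hr : r ≤ xs.length)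
    (h : ∀ j (hj : j < xs.length), p xs[j] = decide (j < r)) : xs.countP p = r := by
  induction xs generalizing r with
  | nil => simp at hr ⊢; omega
  | cons a t ih =>
    cases r with
    | zero =>
      have hall : ∀ x ∈ a :: t, p x = false := by
        intro x hx
        obtain ⟨j, hj, rfl⟩ := List.getElem_of_mem hx
        simpa using h j hj
      rw [List.countP_eq_zero.mpr (by intro x hx; simp [hall x hx])]
    | succ r =>
      have hpa : p a = true := by simpa using h 0 (by simp)
      rw [List.countP_cons, hpa]
      rw [ih r (by simpa using hr) (fun j hj => by simpa using h (j+1) (by simpa using hj))]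
      simp

theorem pv_bisectLeft_countP (xs : List String) (x : String) (hs : List.Pairwise (· ≤ ·) xs) :
    PySem.List.bisectLeft xs x = xs.countP (fun y => decide (y < x)) := by
  have hres := pv_bisectLeftLoop_spec xs x hs xs.length 0 xs.length (Nat.zero_le _) le_rfl
    (by omega) (by intro j hj hjlt; omega) (by intro j hj hje; omega)
  rw [PySem.List.bisectLeft]
  refine (pv_countP_prefix _ xs _ hres.2.1 ?_).symm
  intro j hj
  by_cases hjr : j < PySem.List.bisectLeftLoop xs x xs.length 0 xs.length
  · simp [hjr, hres.2.2.1 j hj hjr]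
  · simp [hjr, hres.2.2.2 j hj (by omega)]

theorem pv_bisectRight_countP (xs : List String) (x : String) (hs : List.Pairwise (· ≤ ·) xs) :
    PySem.List.bisectRight xs x = xs.countP (fun y => decide (y ≤ x)) := by
  have hres := pv_bisectRightLoop_spec xs x hs xs.length 0 xs.length (Nat.zero_le _) le_rfl
    (by omega) (by intro j hj hjlt; omega) (by intro j hj hje; omega)
  rw [PySem.List.bisectRight]
  refine (pv_countP_prefix _ xs _ hres.2.1 ?_).symm
  intro j hj
  by_cases hjr : j < PySem.List.bisectRightLoop xs x xs.length 0 xs.length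
  · simp [hjr, hres.2.2.1 j hj hjr]
  · simp [hjr, hres.2.2.2 j hj (by omega)]

theorem pv_count_split (b : List String) (lo hi : String) (hlh : lo ≤ hi) :
    b.countP (fun y => decide (y ≤ hi)) =
      b.countP (fun y => decide (y < lo)) +
      b.countP (fun y => decide (lo ≤ y) && decide (y ≤ hi)) := by
  induction b with
  | nil => simp
  | cons c t ih =>
    rw [List.countP_cons, List.countP_cons, List.countP_cons, ih]
    rcases lt_or_ge c lo with hc | hc
    · rw [decide_eq_true (le_trans (le_of_lt hc) hlh), decide_eq_true hc,
        decide_eq_false (not_le_of_gt hc), Bool.false_and]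
      simp only [if_pos rfl, if_neg (by simp : ¬ (false = true))]
      omega
    · rw [decide_eq_false (not_lt_of_ge hc), decide_eq_true hc, Bool.true_and]
      simp only [if_neg (by simp : ¬ (false = true))]
      omega

theorem pv_count_by_range_eq (b : List String) (lo hi : String) (hlh : lo ≤ hi)
    (hs : List.Pairwise (· ≤ ·) b) :
    count_by_range b lo hi = (b.countP (fun y => decide (lo ≤ y) && decide (y ≤ hi)) : Int) := by
  rw [count_by_range, pv_bisectLeft_countP b lo hs, pv_bisectRight_countP b hi hs,
    pv_count_split b lo hi hlh]
  push_cast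
  ring


theorem pv_build_length (f : String → String) (words : List String) (A : List (List String)) :
    (words.foldl (fun a w =>
      PySem.List.pySetD a (PySem.Str.len w)
        (PySem.List.pyGetD a (PySem.Str.len w) [] ++ [f w])) A).length = A.length := by
  induction words generalizing A with
  | nil => rfl
  | cons w t ih => rw [List.foldl_cons, ih, PySem.List.length_pySetD]

theorem pv_array_len :
    ((PySem.List.pyRange 0 10001 1).map (fun _ => ([] : List String))).length = 10001 := by
  rw [List.length_map, PySem.List.length_pyRange_one]
  norm_num
  rfl

theorem pv_getD_nils (L : Nat) :
    PySem.List.pyGetD ((PySem.List.pyRange 0 10001 1).map (fun _ => ([] : List String)))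
      (L : Int) [] = [] := by
  rw [PySem.List.pyGetD_natCast, List.getD_eq_getElem?_getD]
  rcases Nat.lt_or_ge L 10001 with h | h
  · have hlt : L < ((PySem.List.pyRange 0 10001 1).map (fun _ => ([] : List String))).length := by
      rw [pv_array_len]; omega
    rw [List.getElem?_eq_getElem hlt, Option.getD_some, List.getElem_map]
  · rw [List.getElem?_eq_none (by rw [pv_array_len]; omega), Option.getD_none]

theorem pv_getD_map (g : List String → List String) (A : List (List String)) (L : Nat)
    (hL : L < A.length) :
    PySem.List.pyGetD (A.map g) (L : Int) [] = g (PySem.List.pyGetD A (L : Int) []) := by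
  have hL' : L < (A.map g).length := by rw [List.length_map]; omega
  rw [PySem.List.pyGetD_natCast, PySem.List.pyGetD_natCast,
    List.getD_eq_getElem?_getD, List.getD_eq_getElem?_getD,
    List.getElem?_eq_getElem hL', List.getElem?_eq_getElem hL,
    Option.getD_some, Option.getD_some, List.getElem_map]

theorem pv_bucket_sorted (f : String → String) (words : List String)
    (hw : ∀ w ∈ words, w.toList.length ≤ 10000) (L : Nat) (hL : L ≤ 10000) :
    PySem.List.pyGetD
      ((PySem.List.pyRange 0 10001 1).foldl
        (fun a i => PySem.List.pySetD a i
          (PySem.List.sorted (PySem.List.pyGetD a i []) (fun x => x) false))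
        (words.foldl (fun a w =>
          PySem.List.pySetD a (PySem.Str.len w)
            (PySem.List.pyGetD a (PySem.Str.len w) [] ++ [f w]))
          ((PySem.List.pyRange 0 10001 1).map (fun _ => ([] : List String)))))
      (L : Int) [] =
    PySem.List.sorted ((words.filter (fun w => w.toList.length == L)).map f) (fun x => x) false := by
  have hlen : (words.foldl (fun a w =>
      PySem.List.pySetD a (PySem.Str.len w)
        (PySem.List.pyGetD a (PySem.Str.len w) [] ++ [f w]))
      ((PySem.List.pyRange 0 10001 1).map (fun _ => ([] : List String)))).length = 10001 := by
    rw [pv_build_length, pv_array_len]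
  have hsf := pv_sort_fold 0 _ hlen
  rw [show ((0 : Nat) : Int) = (0 : Int) from rfl] at hsf
  rw [hsf]
  rw [List.take_zero, List.drop_zero, List.nil_append]
  rw [pv_getD_map _ _ L (by omega)]
  rw [pv_build_bucket f words _ pv_array_len hw L hL]
  rw [pv_getD_nils L, List.nil_append]

-- ===== VERDICT (by name: the statement is the Claim_ definition above) =====
theorem pv_foldl_pair {α β γ : Type} (f : β → α → β) (g : γ → α → γ) (l : List α) (a : β) (b : γ) :
    l.foldl (fun p x => (f p.1 x, g p.2 x)) (a, b) = (l.foldl f a, l.foldl g b) := by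
  induction l generalizing a b with
  | nil => rfl
  | cons x t ih => simpa using ih (f a x) (g b x)

theorem pv_pair_build (words : List String) (a b : List (List String)) :
    words.foldl (fun p word =>
      (PySem.List.pySetD p.1 (PySem.Str.len word)
         (PySem.List.pyGetD p.1 (PySem.Str.len word) [] ++ [word]),
       PySem.List.pySetD p.2 (PySem.Str.len word)
         (PySem.List.pyGetD p.2 (PySem.Str.len word) [] ++ [pvRev word]))) (a, b) =
    (words.foldl (fun a word =>
       PySem.List.pySetD a (PySem.Str.len word)
         (PySem.List.pyGetD a (PySem.Str.len word) [] ++ [word])) a,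
     words.foldl (fun a word =>
       PySem.List.pySetD a (PySem.Str.len word)
         (PySem.List.pyGetD a (PySem.Str.len word) [] ++ [pvRev word])) b) :=
  pv_foldl_pair
    (fun a word => PySem.List.pySetD a (PySem.Str.len word)
      (PySem.List.pyGetD a (PySem.Str.len word) [] ++ [word]))
    (fun a word => PySem.List.pySetD a (PySem.Str.len word)
      (PySem.List.pyGetD a (PySem.Str.len word) [] ++ [pvRev word])) words a b

theorem pv_pair_sort (l : List Int) (a b : List (List String)) :
    l.foldl (fun p i =>
      (PySem.List.pySetD p.1 i (PySem.List.sorted (PySem.List.pyGetD p.1 i []) (fun x => x) false),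
       PySem.List.pySetD p.2 i (PySem.List.sorted (PySem.List.pyGetD p.2 i []) (fun x => x) false))) (a, b) =
    (l.foldl (fun a i =>
       PySem.List.pySetD a i (PySem.List.sorted (PySem.List.pyGetD a i []) (fun x => x) false)) a,
     l.foldl (fun a i =>
       PySem.List.pySetD a i (PySem.List.sorted (PySem.List.pyGetD a i []) (fun x => x) false)) b) :=
  pv_foldl_pair
    (fun a i => PySem.List.pySetD a i (PySem.List.sorted (PySem.List.pyGetD a i []) (fun x => x) false))
    (fun a i => PySem.List.pySetD a i (PySem.List.sorted (PySem.List.pyGetD a i []) (fun x => x) false)) l a b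

theorem pv_pred_eq (f : String → String) (q lo hi : String) (w : String) :
    (((fun y => decide (lo ≤ y) && decide (y ≤ hi)) ∘ f) w && (w.toList.length == q.toList.length)) =
    ((PySem.Str.len w == PySem.Str.len q) && decide (lo ≤ f w) && decide (f w ≤ hi)) := by
  have hlen : ((PySem.Str.len w == PySem.Str.len q) : Bool) = (w.toList.length == q.toList.length) := by
    rw [PySem.Str.len_eq, PySem.Str.len_eq]
    by_cases h : w.toList.length = q.toList.length
    · simp [h]
    · simp [h]
  rw [hlen]
  simp only [Function.comp_apply]
  rw [Bool.and_comm, ← Bool.and_assoc]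

theorem pv_branch_count (f : String → String) (words : List String)
    (hw : ∀ w ∈ words, w.toList.length ≤ 10000) (q lo hi : String)
    (hq : q.toList.length ≤ 10000) (hlh : lo ≤ hi) :
    count_by_range
      (PySem.List.pyGetD
        ((PySem.List.pyRange 0 10001 1).foldl
          (fun a i => PySem.List.pySetD a i
            (PySem.List.sorted (PySem.List.pyGetD a i []) (fun x => x) false))
          (words.foldl (fun a w =>
            PySem.List.pySetD a (PySem.Str.len w)
              (PySem.List.pyGetD a (PySem.Str.len w) [] ++ [f w]))
            ((PySem.List.pyRange 0 10001 1).map (fun _ => ([] : List String)))))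
        (PySem.Str.len q) []) lo hi =
    ((words.countP (fun w =>
        (PySem.Str.len w == PySem.Str.len q) && decide (lo ≤ f w) && decide (f w ≤ hi)) : Nat) : Int) := by
  rw [PySem.Str.len_eq q, pv_bucket_sorted f words hw q.toList.length hq]
  rw [pv_count_by_range_eq _ lo hi hlh
    (by simpa using PySem.List.sorted_pairwise ((words.filter (fun w => w.toList.length == q.toList.length)).map f) (fun x => x))]
  rw [(PySem.List.sorted_perm ((words.filter (fun w => w.toList.length == q.toList.length)).map f) (fun x => x) false).countP_eq]
  rw [List.countP_map, List.countP_filter]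
  exact congrArg _ (List.countP_congr (fun w _ => by rw [pv_pred_eq f q lo hi w, PySem.Str.len_eq q]))

set_option maxRecDepth 8192 in
theorem solution_spec : Claim_equal_solution := by
  unfold Claim_equal_solution
  intro words queries _ hpre
  obtain ⟨hw, hqs⟩ := hpre
  unfold Spec_solution
  show solution words queries = solution_alt words queries
  unfold solution solution_alt
  simp only [PySem.List.foldl_append_singleton_eq_map, List.nil_append]
  simp only [pv_pair_build, pv_pair_sort]
  apply List.map_congr_left
  intro q hqm
  have hq2 : q.toList.length ≤ 10000 := (hqs q hqm).2
  by_cases h0 : (PySem.Str.pyGet? q 0 == some '?') = true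
  · rw [if_pos h0]
    rw [if_pos h0]
    exact pv_branch_count pvRev words hw q _ _ hq2 (pv_lo_le_hi (pvRev q))
  · rw [if_neg h0]
    rw [if_neg h0]
    exact pv_branch_count (fun w => w) words hw q _ _ hq2 (pv_lo_le_hi q)
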